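-- pv_equiv track=rewrite | github.com/shengchichill/kismet | kismet/agent/tools/mine.py | find_lucky_match
-- ===== SOURCE A (Python) =====
-- from typing import TYPE_CHECKING, Optional
--
-- def find_lucky_match(hash_str: str, targets: list[str]) -> Optional[str]:
--     """Return the matched lucky substring, or None if not lucky."""
--     if targets:
--         for t in targets:
--             if t.lower() in hash_str.lower():
--                 idx = hash_str.lower().find(t.lower())
--                 return hash_str[idx : idx + len(t)]
--         return None
--     for s in _LUCKY_STRINGS:
--         if s in hash_str:
--             return s
--     for i in range(len(hash_str) - 2):
--         if (
--             ord(hash_str[i + 1]) == ord(hash_str[i]) + 1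
--             and ord(hash_str[i + 2]) == ord(hash_str[i]) + 2
--         ):
--             return hash_str[i : i + 3]
--     n = len(hash_str)
--     for length in range(4, n + 1):
--         for start in range(n - length + 1):
--             sub = hash_str[start : start + length]
--             if sub == sub[::-1]:
--                 return sub
--     return None
--
-- _LUCKY_STRINGS = ["888", "168", "666", "777"]
-- ===== SOURCE B (Python) =====
-- # B: one zip-windows pass per phase; the palindrome search checks only lengths 4
-- # and 5 (any palindrome of length >= 6 contains one two shorter inside it),
-- # instead of A's scan over every palindrome length from 4 to n.
-- from typing import Optional
--
-- _LUCKY_STRINGS = ["888", "168", "666", "777"]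
--
--
-- def find_lucky_match(hash_str: str, targets: list[str]) -> Optional[str]:
--     """Return the matched lucky substring, or None if not lucky."""
--     if targets:
--         hl = hash_str.lower()
--         for t in targets:
--             i = hl.find(t.lower())
--             if i >= 0:
--                 return hash_str[i : i + len(t)]
--         return None
--     subs3 = {a + b + c for a, b, c in zip(hash_str, hash_str[1:], hash_str[2:])}
--     for lucky in _LUCKY_STRINGS:
--         if lucky in subs3:
--             return lucky
--     for a, b, c in zip(hash_str, hash_str[1:], hash_str[2:]):
--         if ord(b) == ord(a) + 1 and ord(c) == ord(a) + 2:
--             return a + b + c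
--     for a, b, c, d in zip(hash_str, hash_str[1:], hash_str[2:], hash_str[3:]):
--         if a == d and b == c:
--             return a + b + c + d
--     for a, b, c, d, e in zip(hash_str, hash_str[1:], hash_str[2:], hash_str[3:], hash_str[4:]):
--         if a == e and b == d:
--             return a + b + c + d + e
--     return None
-- ===== Notes on version B (the rewrite author's own statement) =====
-- stated objective: alternative
-- what changed: Every phase becomes a single sliding-window pass (zip windows): the lucky strings are looked up in a set of length-3 windows built once, the ascending triple and the palindromes are found by direct window character comparisons, and only palindrome lengths 4 and 5 are checked (any palindrome of length >= 6 contains one two shorter inside it), replacing A's scan of every palindrome length from 4 to n with slice-and-reverse tests; the target phase lowercases the hash once and uses a single find instead of 'in' plus find. Intended as faster on the palindrome phase; …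
import Mathlib
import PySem

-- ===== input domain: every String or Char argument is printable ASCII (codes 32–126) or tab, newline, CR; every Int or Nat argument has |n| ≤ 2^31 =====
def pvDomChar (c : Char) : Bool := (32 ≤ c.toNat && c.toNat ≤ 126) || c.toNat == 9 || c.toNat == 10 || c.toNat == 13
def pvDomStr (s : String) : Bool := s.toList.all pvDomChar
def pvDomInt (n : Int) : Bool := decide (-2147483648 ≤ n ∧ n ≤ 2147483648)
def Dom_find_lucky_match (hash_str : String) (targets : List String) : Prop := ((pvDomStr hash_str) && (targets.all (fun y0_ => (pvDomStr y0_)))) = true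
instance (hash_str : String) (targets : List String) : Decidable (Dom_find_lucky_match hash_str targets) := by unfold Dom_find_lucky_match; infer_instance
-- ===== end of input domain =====

-- B scans the string once per phase over sliding windows (a set of 3-windows for
-- the lucky strings, window recursions for the ascending run and for palindromes
-- of lengths 4 and 5 only — a palindrome of length ≥ 6 contains one two shorter),
-- replacing A's scan over every palindrome length from 4 to n; same return value
-- everywhere (proved below).

-- ===== PORT A =====
def pyLuckyStrings : List String := ["888", "168", "666", "777"]

def find_lucky_match (hash_str : String) (targets : List String) : Option String :=
  match targets with
  | _ :: _ =>
    -- for t in targets: if t.lower() in hash_str.lower(): idx = ...find(...); return hash_str[idx:idx+len(t)]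
    targets.findSome? (fun t =>
      if PySem.Str.isIn (PySem.Str.lower t) (PySem.Str.lower hash_str) then
        let idx := PySem.Str.find (PySem.Str.lower hash_str) (PySem.Str.lower t)
        some (PySem.Str.slice hash_str (some idx) (some (idx + PySem.Str.len t)))
      else none)
  | [] =>
    match pyLuckyStrings.findSome? (fun s => if PySem.Str.isIn s hash_str then some s else none) with
    | some s => some s
    | none =>
      let cs := hash_str.toList
      -- for i in range(len(hash_str) - 2): ord comparisons
      match (PySem.List.pyRange 0 (PySem.List.len cs - 2) 1).findSome? (fun i =>
          if ((PySem.List.pyGetD cs (i + 1) ' ').toNat : Int) = ((PySem.List.pyGetD cs i ' ').toNat : Int) + 1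
             ∧ ((PySem.List.pyGetD cs (i + 2) ' ').toNat : Int) = ((PySem.List.pyGetD cs i ' ').toNat : Int) + 2
          then some (String.ofList (PySem.List.slice cs (some i) (some (i + 3)))) else none) with
      | some r => some r
      | none =>
        let n := PySem.List.len cs
        -- for length in range(4, n+1): for start in range(n-length+1): sub == sub[::-1]
        (PySem.List.pyRange 4 (n + 1) 1).findSome? (fun length =>
          (PySem.List.pyRange 0 (n - length + 1) 1).findSome? (fun start =>
            let sub := PySem.List.slice cs (some start) (some (start + length))
            if PySem.List.slice? sub none none (-1) = some sub
            then some (String.ofList sub) else none))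

-- ===== PORT B =====
-- helpers are sliding-window recursions over the character list (Source B's zip windows)

-- {a+b+c for a,b,c in zip(s, s[1:], s[2:])} : the length-3 windows
def windows3 : List Char → List (List Char)
  | a :: rest@(b :: c :: _) => [a, b, c] :: windows3 rest
  | _ => []

-- for lucky in _LUCKY_STRINGS: if lucky in subs3: return lucky
def luckyScan (subs3 : PySem.Set String) : List String → Option String
  | [] => none
  | s :: r => if PySem.Set.contains subs3 s then some s else luckyScan subs3 r

-- for a,b,c in zip(...): ascending triple
def firstAsc : List Char → Option String
  | a :: rest@(b :: c :: _) =>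
    if b.toNat = a.toNat + 1 ∧ c.toNat = a.toNat + 2 then some (String.ofList [a, b, c])
    else firstAsc rest
  | _ => none

-- for a,b,c,d in zip(...): length-4 palindrome window
def firstPal4 : List Char → Option String
  | a :: rest@(b :: c :: d :: _) =>
    if a = d ∧ b = c then some (String.ofList [a, b, c, d]) else firstPal4 rest
  | _ => none

-- for a,b,c,d,e in zip(...): length-5 palindrome window
def firstPal5 : List Char → Option String
  | a :: rest@(b :: c :: d :: e :: _) =>
    if a = e ∧ b = d then some (String.ofList [a, b, c, d, e]) else firstPal5 rest
  | _ => none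

-- for t in targets: i = hl.find(t.lower()); if i >= 0: return hash_str[i:i+len(t)]
def findTarget (hash_str : String) (hl : String) : List String → Option String
  | [] => none
  | t :: ts =>
    let i := PySem.Str.find hl (PySem.Str.lower t)
    if 0 ≤ i then some (PySem.Str.slice hash_str (some i) (some (i + PySem.Str.len t)))
    else findTarget hash_str hl ts

def find_lucky_match_alt (hash_str : String) (targets : List String) : Option String :=
  match targets with
  | _ :: _ => findTarget hash_str (PySem.Str.lower hash_str) targets
  | [] =>
    let cs := hash_str.toList
    let subs3 := PySem.Set.ofList ((windows3 cs).map String.ofList)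
    match luckyScan subs3 pyLuckyStrings with
    | some s => some s
    | none =>
      match firstAsc cs with
      | some r => some r
      | none =>
        match firstPal4 cs with
        | some r => some r
        | none => firstPal5 cs

-- ===== PRECONDITION & SPEC =====
def Spec_find_lucky_match (hash_str : String) (targets : List String) (out : Option String) : Prop := out = find_lucky_match_alt hash_str targets
instance (hash_str : String) (targets : List String) (out : Option String) : Decidable (Spec_find_lucky_match hash_str targets out) := by unfold Spec_find_lucky_match; infer_instance

-- ===== CLAIM (what is proved, stated in full; the proofs are below) =====
def Claim_equal_find_lucky_match : Prop := ∀ (hash_str : String) (targets : List String), Dom_find_lucky_match hash_str targets → Spec_find_lucky_match hash_str targets (find_lucky_match hash_str targets)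

-- ===== LEMMAS AND PROOFS =====

theorem findSome?_congr_mem {α β : Type} {l : List α} {f g : α → Option β}
    (h : ∀ x ∈ l, f x = g x) : l.findSome? f = l.findSome? g := by
  induction l with
  | nil => rfl
  | cons a t ih =>
    simp only [List.findSome?_cons, h a (by simp)]
    cases g a with
    | some v => rfl
    | none => exact ih (fun x hx => h x (by simp [hx]))

theorem pyRange_zero_toNat (m : Int) :
    PySem.List.pyRange 0 m 1 = (List.range m.toNat).map (Nat.cast : Nat → Int) := by
  by_cases hm : m ≤ 0
  · have h1 : m.toNat = 0 := by omega
    have h2 : PySem.List.pyRange 0 m 1 = [] := by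
      apply List.eq_nil_iff_forall_not_mem.mpr
      intro x hx
      rw [PySem.List.mem_pyRange_one] at hx
      omega
    simp [h1, h2]
  · have h3 : m = (m.toNat : Int) := by omega
    calc PySem.List.pyRange 0 m 1 = PySem.List.pyRange 0 ((m.toNat : Int)) 1 := by rw [← h3]
      _ = (List.range m.toNat).map (Nat.cast : Nat → Int) := PySem.List.pyRange_zero_natCast m.toNat

-- normalized (Nat-indexed) forms of A's three scanning phases
def ascN (cs : List Char) : Option String :=
  (List.range (cs.length - 2)).findSome? (fun i =>
    if (cs.getD (i + 1) ' ').toNat = (cs.getD i ' ').toNat + 1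
       ∧ (cs.getD (i + 2) ' ').toNat = (cs.getD i ' ').toNat + 2
    then some (String.ofList ((cs.drop i).take 3)) else none)

def scanN (cs : List Char) (L : Nat) : Option String :=
  (List.range (cs.length + 1 - L)).findSome? (fun s =>
    if ((cs.drop s).take L).reverse = (cs.drop s).take L
    then some (String.ofList ((cs.drop s).take L)) else none)

theorem ascA_eq (cs : List Char) :
    (PySem.List.pyRange 0 ((cs.length : Int) - 2) 1).findSome? (fun i =>
      if ((PySem.List.pyGetD cs (i + 1) ' ').toNat : Int) = ((PySem.List.pyGetD cs i ' ').toNat : Int) + 1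
         ∧ ((PySem.List.pyGetD cs (i + 2) ' ').toNat : Int) = ((PySem.List.pyGetD cs i ' ').toNat : Int) + 2
      then some (String.ofList (PySem.List.slice cs (some i) (some (i + 3)))) else none)
    = ascN cs := by
  rw [pyRange_zero_toNat, List.findSome?_map]
  have hn : ((cs.length : Int) - 2).toNat = cs.length - 2 := by omega
  rw [hn]
  unfold ascN
  apply findSome?_congr_mem
  intro i _
  simp only [Function.comp_apply,
    show ((i : Int) + 1) = (((i + 1 : Nat)) : Int) from by push_cast; ring,
    show ((i : Int) + 2) = (((i + 2 : Nat)) : Int) from by push_cast; ring,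
    show ((i : Int) + 3) = ((i : Int) + ((3 : Nat) : Int)) from by push_cast; ring,
    PySem.List.pyGetD_natCast, PySem.List.slice_natCast_add]
  by_cases h : (cs.getD (i + 1) ' ').toNat = (cs.getD i ' ').toNat + 1
       ∧ (cs.getD (i + 2) ' ').toNat = (cs.getD i ' ').toNat + 2
  · rw [if_pos (by omega), if_pos h]
  · rw [if_neg (by omega), if_neg h]

theorem scanA_eq (cs : List Char) (L : Nat) :
    (PySem.List.pyRange 0 ((cs.length : Int) - (L : Int) + 1) 1).findSome? (fun start =>
      let sub := PySem.List.slice cs (some start) (some (start + (L : Int)))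
      if PySem.List.slice? sub none none (-1) = some sub
      then some (String.ofList sub) else none)
    = scanN cs L := by
  rw [pyRange_zero_toNat, List.findSome?_map]
  have hn : ((cs.length : Int) - (L : Int) + 1).toNat = cs.length + 1 - L := by omega
  rw [hn]
  unfold scanN
  apply findSome?_congr_mem
  intro s _
  simp only [Function.comp_apply, PySem.List.slice_natCast_add, PySem.List.slice?_none_none_neg_one,
    Option.some.injEq]

-- ascending phase: A's index scan computes B's window recursion
theorem ascN_eq_firstAsc (cs : List Char) : ascN cs = firstAsc cs := by
  induction cs with
  | nil => simp [ascN, firstAsc]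
  | cons a t ih =>
    match t, ih with
    | [], _ => simp [ascN, firstAsc]
    | [b], _ => simp [ascN, firstAsc]
    | b :: c :: t'', ih =>
      show ascN (a :: b :: c :: t'') = firstAsc (a :: b :: c :: t'')
      have hlen : (a :: b :: c :: t'').length - 2 = t''.length + 1 := by simp
      unfold ascN
      rw [hlen, List.range_succ_eq_map, List.findSome?_cons]
      have hrest : ((List.range t''.length).map Nat.succ).findSome? (fun i =>
          if ((a :: b :: c :: t'').getD (i + 1) ' ').toNat = ((a :: b :: c :: t'').getD i ' ').toNat + 1
             ∧ ((a :: b :: c :: t'').getD (i + 2) ' ').toNat = ((a :: b :: c :: t'').getD i ' ').toNat + 2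
          then some (String.ofList (((a :: b :: c :: t'').drop i).take 3)) else none)
          = ascN (b :: c :: t'') := by
        rw [List.findSome?_map]
        unfold ascN
        have hlen2 : (b :: c :: t'').length - 2 = t''.length := by simp
        rw [hlen2]
        apply findSome?_congr_mem
        intro i _
        simp [Function.comp, List.drop_succ_cons, Nat.succ_eq_add_one]
      by_cases h : b.toNat = a.toNat + 1 ∧ c.toNat = a.toNat + 2
      · simp [firstAsc, h]
      · have hA : ¬ (((a :: b :: c :: t'').getD (0 + 1) ' ').toNat = ((a :: b :: c :: t'').getD 0 ' ').toNat + 1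
             ∧ ((a :: b :: c :: t'').getD (0 + 2) ' ').toNat = ((a :: b :: c :: t'').getD 0 ' ').toNat + 2) := by
          simpa using h
        rw [if_neg hA]
        simp only [hrest, ih]
        simp [firstAsc, h]

-- palindromicity of the explicit 4- and 5-windows
theorem rev4_iff (a b c d : Char) : [a, b, c, d].reverse = [a, b, c, d] ↔ a = d ∧ b = c := by
  simp only [List.reverse_cons, List.reverse_nil]
  constructor
  · intro h
    simp at h
    exact ⟨h.1.symm, h.2.1.symm⟩
  · rintro ⟨h1, h2⟩
    simp [h1, h2]

theorem rev5_iff (a b c d e : Char) : [a, b, c, d, e].reverse = [a, b, c, d, e] ↔ a = e ∧ b = d := by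
  simp only [List.reverse_cons, List.reverse_nil]
  constructor
  · intro h
    simp at h
    exact ⟨h.1.symm, h.2.1.symm⟩
  · rintro ⟨h1, h2⟩
    simp [h1, h2]

-- A's fixed-length-4 scan computes B's window recursion
theorem scanN4_eq_firstPal4 (cs : List Char) : scanN cs 4 = firstPal4 cs := by
  induction cs with
  | nil => simp [scanN, firstPal4]
  | cons a t ih =>
    match t, ih with
    | [], _ => simp [scanN, firstPal4]
    | [b], _ => simp [scanN, firstPal4]
    | [b, c], _ => simp [scanN, firstPal4]
    | b :: c :: d :: t'', ih =>
      show scanN (a :: b :: c :: d :: t'') 4 = firstPal4 (a :: b :: c :: d :: t'')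
      have hlen : (a :: b :: c :: d :: t'').length + 1 - 4 = t''.length + 1 := by simp
      unfold scanN
      rw [hlen, List.range_succ_eq_map, List.findSome?_cons]
      have hrest : ((List.range t''.length).map Nat.succ).findSome? (fun s =>
          if (((a :: b :: c :: d :: t'').drop s).take 4).reverse = ((a :: b :: c :: d :: t'').drop s).take 4
          then some (String.ofList (((a :: b :: c :: d :: t'').drop s).take 4)) else none)
          = scanN (b :: c :: d :: t'') 4 := by
        rw [List.findSome?_map]
        unfold scanN
        have hlen2 : (b :: c :: d :: t'').length + 1 - 4 = t''.length := by simp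
        rw [hlen2]
        apply findSome?_congr_mem
        intro s _
        simp [Function.comp, List.drop_succ_cons, Nat.succ_eq_add_one]
      have hw : (((a :: b :: c :: d :: t'').drop 0).take 4) = [a, b, c, d] := by simp [List.take]
      by_cases h : a = d ∧ b = c
      · rw [if_pos (by rw [hw]; exact (rev4_iff a b c d).mpr h)]
        simp [firstPal4, h]
      · rw [if_neg (by rw [hw]; exact fun hc => h ((rev4_iff a b c d).mp hc))]
        simp only [hrest, ih]
        simp [firstPal4, h]

theorem scanN5_eq_firstPal5 (cs : List Char) : scanN cs 5 = firstPal5 cs := by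
  induction cs with
  | nil => simp [scanN, firstPal5]
  | cons a t ih =>
    match t, ih with
    | [], _ => simp [scanN, firstPal5]
    | [b], _ => simp [scanN, firstPal5]
    | [b, c], _ => simp [scanN, firstPal5]
    | [b, c, d], _ => simp [scanN, firstPal5]
    | b :: c :: d :: e :: t'', ih =>
      show scanN (a :: b :: c :: d :: e :: t'') 5 = firstPal5 (a :: b :: c :: d :: e :: t'')
      have hlen : (a :: b :: c :: d :: e :: t'').length + 1 - 5 = t''.length + 1 := by simp
      unfold scanN
      rw [hlen, List.range_succ_eq_map, List.findSome?_cons]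
      have hrest : ((List.range t''.length).map Nat.succ).findSome? (fun s =>
          if (((a :: b :: c :: d :: e :: t'').drop s).take 5).reverse = ((a :: b :: c :: d :: e :: t'').drop s).take 5
          then some (String.ofList (((a :: b :: c :: d :: e :: t'').drop s).take 5)) else none)
          = scanN (b :: c :: d :: e :: t'') 5 := by
        rw [List.findSome?_map]
        unfold scanN
        have hlen2 : (b :: c :: d :: e :: t'').length + 1 - 5 = t''.length := by simp
        rw [hlen2]
        apply findSome?_congr_mem
        intro s _
        simp [Function.comp, List.drop_succ_cons, Nat.succ_eq_add_one]
      have hw : (((a :: b :: c :: d :: e :: t'').drop 0).take 5) = [a, b, c, d, e] := by simp [List.take]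
      by_cases h : a = e ∧ b = d
      · rw [if_pos (by rw [hw]; exact (rev5_iff a b c d e).mpr h)]
        simp [firstPal5, h]
      · rw [if_neg (by rw [hw]; exact fun hc => h ((rev5_iff a b c d e).mp hc))]
        simp only [hrest, ih]
        simp [firstPal5, h]

-- a palindrome of the shape x :: m ++ [z] has a palindromic core
theorem palCore (m : List Char) (x z : Char)
    (h : (x :: (m ++ [z])).reverse = x :: (m ++ [z])) : m.reverse = m := by
  have h' : z :: (m.reverse ++ [x]) = x :: (m ++ [z]) := by
    simpa [List.reverse_cons, List.reverse_append] using h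
  injection h' with h1 h2
  subst h1
  exact List.append_inj_left' h2 rfl

theorem decomp (l : List Char) (L : Nat) (h2 : 2 ≤ L) (hlen : L ≤ l.length) :
    l.take L = l.getD 0 ' ' :: (l.tail.take (L - 2) ++ [l.getD (L - 1) ' ']) := by
  match l, L with
  | [], L => simp at hlen; omega
  | a :: t, 0 => omega
  | a :: t, 1 => omega
  | a :: t, (k + 2) =>
    have hk : k < t.length := by simp at hlen; omega
    show (a :: t).take (k + 1 + 1) = _
    rw [List.take_succ_cons, List.take_add_one, List.getElem?_eq_getElem hk]
    simp [List.getD_eq_getElem?_getD, List.getElem?_eq_getElem hk]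

theorem palShrink (cs : List Char) (s L : Nat) (h2 : 2 ≤ L) (hle : s + L ≤ cs.length)
    (h : ((cs.drop s).take L).reverse = (cs.drop s).take L) :
    ((cs.drop (s + 1)).take (L - 2)).reverse = (cs.drop (s + 1)).take (L - 2) := by
  have hlen : L ≤ (cs.drop s).length := by simp only [List.length_drop]; omega
  rw [decomp (cs.drop s) L h2 hlen, List.tail_drop] at h
  exact palCore _ _ _ h

theorem scanN_eq_none_iff (cs : List Char) (L : Nat) :
    scanN cs L = none ↔
      ∀ s, s + L ≤ cs.length → ¬ ((cs.drop s).take L).reverse = (cs.drop s).take L := by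
  unfold scanN
  rw [List.findSome?_eq_none_iff]
  constructor
  · intro h s hs hp
    have := h s (by rw [List.mem_range]; omega)
    simp [hp] at this
  · intro h s hs
    rw [List.mem_range] at hs
    have := h s (by omega)
    simp [this]

theorem noLong (cs : List Char) (h4 : scanN cs 4 = none) (h5 : scanN cs 5 = none) :
    ∀ L, 4 ≤ L → scanN cs L = none := by
  intro L
  induction L using Nat.strong_induction_on with
  | _ L ih =>
    intro hL
    rcases Nat.lt_or_ge L 6 with h6 | h6
    · interval_cases L
      · exact h4
      · exact h5
    · rw [scanN_eq_none_iff]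
      intro s hs hp
      have hnone := ih (L - 2) (by omega) (by omega)
      rw [scanN_eq_none_iff] at hnone
      have := palShrink cs s L (by omega) hs hp
      exact hnone (s + 1) (by omega) this

-- the palindrome phases of the two ports agree
theorem palEq (cs : List Char) :
    ((PySem.List.pyRange 4 ((cs.length : Int) + 1) 1).findSome? (fun length =>
      (PySem.List.pyRange 0 ((cs.length : Int) - length + 1) 1).findSome? (fun start =>
        let sub := PySem.List.slice cs (some start) (some (start + length))
        if PySem.List.slice? sub none none (-1) = some sub
        then some (String.ofList sub) else none)))
    = (match firstPal4 cs with
       | some r => some r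
       | none => firstPal5 cs) := by
  rw [← scanN4_eq_firstPal4, ← scanN5_eq_firstPal5]
  have scanA4 :
      (PySem.List.pyRange 0 ((cs.length : Int) - 4 + 1) 1).findSome? (fun start =>
        let sub := PySem.List.slice cs (some start) (some (start + (4 : Int)))
        if PySem.List.slice? sub none none (-1) = some sub
        then some (String.ofList sub) else none) = scanN cs 4 := by
    have h := scanA_eq cs 4
    push_cast at h
    exact h
  have scanA5 :
      (PySem.List.pyRange 0 ((cs.length : Int) - 5 + 1) 1).findSome? (fun start =>
        let sub := PySem.List.slice cs (some start) (some (start + (5 : Int)))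
        if PySem.List.slice? sub none none (-1) = some sub
        then some (String.ofList sub) else none) = scanN cs 5 := by
    have h := scanA_eq cs 5
    push_cast at h
    exact h
  cases h4 : scanN cs 4 with
  | some v =>
    have hn : 4 ≤ cs.length := by
      by_contra hc
      have hz : cs.length + 1 - 4 = 0 := by omega
      unfold scanN at h4
      rw [hz] at h4
      simp at h4
    rw [PySem.List.pyRange_one_cons (by omega : (4 : Int) < (cs.length : Int) + 1)]
    simp only [List.findSome?_cons]
    rw [scanA4, h4]
  | none =>
    cases h5 : scanN cs 5 with
    | some v =>
      have hn : 5 ≤ cs.length := by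
        by_contra hc
        have hz : cs.length + 1 - 5 = 0 := by omega
        unfold scanN at h5
        rw [hz] at h5
        simp at h5
      rw [PySem.List.pyRange_one_cons (by omega : (4 : Int) < (cs.length : Int) + 1)]
      simp only [List.findSome?_cons]
      rw [scanA4, h4]
      rw [show ((4 : Int) + 1) = 5 from by norm_num]
      rw [PySem.List.pyRange_one_cons (by omega : (5 : Int) < (cs.length : Int) + 1)]
      simp only [List.findSome?_cons]
      rw [scanA5, h5]
    | none =>
      rw [List.findSome?_eq_none_iff.mpr]
      intro L hL
      rw [PySem.List.mem_pyRange_one] at hL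
      beta_reduce
      rw [show L = ((L.toNat : Nat) : Int) from by omega, scanA_eq cs L.toNat]
      exact noLong cs h4 h5 L.toNat (by omega)

-- lucky phase: a 3-character string occurs in cs iff it is one of the 3-windows
theorem mem_windows3_iff (x y z : Char) (cs : List Char) :
    [x, y, z] ∈ windows3 cs ↔ [x, y, z] <:+: cs := by
  induction cs with
  | nil => simp [windows3]
  | cons a t ih =>
    rw [List.infix_cons_iff, ← ih]
    match t with
    | [] => simp [windows3, List.cons_prefix_cons]
    | [b] => simp [windows3, List.cons_prefix_cons]
    | b :: c :: t'' =>
      rw [show windows3 (a :: b :: c :: t'') = [a, b, c] :: windows3 (b :: c :: t'') from by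
        simp [windows3]]
      simp only [List.mem_cons, List.cons_prefix_cons, List.nil_prefix, and_true,
        List.cons.injEq]

theorem lucky_eq (hash_str : String) (L : List String)
    (h : ∀ s ∈ L, ∃ x y z, s.toList = [x, y, z]) :
    L.findSome? (fun s => if PySem.Str.isIn s hash_str then some s else none)
    = luckyScan (PySem.Set.ofList ((windows3 hash_str.toList).map String.ofList)) L := by
  induction L with
  | nil => rfl
  | cons s r ih =>
    obtain ⟨x, y, z, hs⟩ := h s (by simp)
    have hiff : (PySem.Str.isIn s hash_str = true)
        ↔ (PySem.Set.contains (PySem.Set.ofList ((windows3 hash_str.toList).map String.ofList)) s = true) := by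
      rw [PySem.Str.isIn_iff_infix, PySem.Set.contains_iff, PySem.Set.mem_ofList, List.mem_map]
      constructor
      · intro hin
        exact ⟨s.toList, by rw [hs]; exact (mem_windows3_iff x y z _).mpr (hs ▸ hin),
          String.ofList_toList⟩
      · rintro ⟨w, hw, rfl⟩
        have hwl : w = [x, y, z] := by rw [← hs, String.toList_ofList]
        rw [String.toList_ofList, hwl]
        exact (mem_windows3_iff x y z _).mp (hwl ▸ hw)
    by_cases hb : PySem.Str.isIn s hash_str = true
    · have h2 := hiff.mp hb
      rw [List.findSome?_cons, if_pos hb,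
        show luckyScan (PySem.Set.ofList ((windows3 hash_str.toList).map String.ofList)) (s :: r)
          = if PySem.Set.contains (PySem.Set.ofList ((windows3 hash_str.toList).map String.ofList)) s
            then some s
            else luckyScan (PySem.Set.ofList ((windows3 hash_str.toList).map String.ofList)) r from rfl,
        if_pos h2]
    · have h2 : ¬ (PySem.Set.contains (PySem.Set.ofList ((windows3 hash_str.toList).map String.ofList)) s = true) :=
        fun hc => hb (hiff.mpr hc)
      rw [List.findSome?_cons, if_neg hb,
        show luckyScan (PySem.Set.ofList ((windows3 hash_str.toList).map String.ofList)) (s :: r)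
          = if PySem.Set.contains (PySem.Set.ofList ((windows3 hash_str.toList).map String.ofList)) s
            then some s
            else luckyScan (PySem.Set.ofList ((windows3 hash_str.toList).map String.ofList)) r from rfl,
        if_neg h2]
      exact ih (fun u hu => h u (by simp [hu]))

-- target phase
theorem target_eq (hash_str : String) (L : List String) :
    L.findSome? (fun t =>
      if PySem.Str.isIn (PySem.Str.lower t) (PySem.Str.lower hash_str) then
        let idx := PySem.Str.find (PySem.Str.lower hash_str) (PySem.Str.lower t)
        some (PySem.Str.slice hash_str (some idx) (some (idx + PySem.Str.len t)))
      else none)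
    = findTarget hash_str (PySem.Str.lower hash_str) L := by
  induction L with
  | nil => rfl
  | cons t r ih =>
    have hiff : (PySem.Str.isIn (PySem.Str.lower t) (PySem.Str.lower hash_str) = true)
        ↔ (0 ≤ PySem.Str.find (PySem.Str.lower hash_str) (PySem.Str.lower t)) := by
      rw [PySem.Str.isIn_iff_infix, PySem.Str.find_nonneg_iff]
    by_cases hb : PySem.Str.isIn (PySem.Str.lower t) (PySem.Str.lower hash_str) = true
    · have h2 := hiff.mp hb
      simp only [List.findSome?_cons, if_pos hb, findTarget, if_pos h2]
    · have h2 : ¬ (0 ≤ PySem.Str.find (PySem.Str.lower hash_str) (PySem.Str.lower t)) :=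
        fun hc => hb (hiff.mpr hc)
      simp only [List.findSome?_cons, if_neg hb, findTarget, if_neg h2]
      exact ih

-- ===== VERDICT (by name: the statement is the Claim_ definition above) =====
theorem find_lucky_match_spec : Claim_equal_find_lucky_match := by
  intro hash_str targets _
  unfold Spec_find_lucky_match
  cases targets with
  | cons t ts =>
    simp only [find_lucky_match, find_lucky_match_alt]
    exact target_eq hash_str (t :: ts)
  | nil =>
    simp only [find_lucky_match, find_lucky_match_alt]
    rw [lucky_eq hash_str pyLuckyStrings (by
      intro s hs
      simp only [pyLuckyStrings, List.mem_cons, List.not_mem_nil, or_false] at hs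
      rcases hs with rfl | rfl | rfl | rfl
      · exact ⟨'8', '8', '8', rfl⟩
      · exact ⟨'1', '6', '8', rfl⟩
      · exact ⟨'6', '6', '6', rfl⟩
      · exact ⟨'7', '7', '7', rfl⟩)]
    cases hx : luckyScan (PySem.Set.ofList ((windows3 hash_str.toList).map String.ofList)) pyLuckyStrings with
    | some s => rfl
    | none =>
      rw [show PySem.List.len hash_str.toList = (hash_str.toList.length : Int) from PySem.List.len_eq _]
      rw [ascA_eq, ascN_eq_firstAsc]
      cases hasc : firstAsc hash_str.toList with
      | some r => rfl
      | none => exact palEq hash_str.toList
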